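-- pv_equiv track=rewrite | github.com/huoyuxi/ChatPRE | Analyzer/ChatPRE-Scaled-down.py | text_field_LLM
-- ===== SOURCE A (Python) =====
-- def text_field_LLM(A,B):
--     result = [-1]
--     start = 0
--     r = set()
--     string_dict = {}
--     while start < len(B):
--         found = False
--         for pattern in A:
--             if pattern == "":
--                 continue
--             if B[start:].startswith(pattern):
--                 if int(start/2)-1 not in result:
--                     result.append(int(start/2)-1)
--                 result.append(int((start+len(pattern))/2-1))
--                 string_dict[",".join([str(ii) for ii in range(int(start/2),int((start+len(pattern))/2))])] = pattern
--                 # result.append((int(start/2),)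
--                 for i in range(int(start/2),int((start+len(pattern))/2)):
--                     r.add(i)
--                 start += len(pattern)
--                 found = True
--                 break
--         if not found:
--             start += 2
--     return result,r,string_dict
-- ===== SOURCE B (Python) =====
-- def text_field_LLM(A, B):
--     # Bucket the (non-empty) patterns by first character, in A order.
--     buckets = {}
--     for p in A:
--         if p:
--             buckets[p[0]] = buckets.get(p[0], []) + [p]
--     # Single scan of B collecting the matched segments (start, pattern).
--     segs = []
--     start = 0
--     n = len(B)
--     while start < n:
--         hit = None
--         for p in buckets.get(B[start], []):
--             if B.startswith(p, start):
--                 hit = p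
--                 break
--         if hit is None:
--             start += 2
--         else:
--             segs.append((start, hit))
--             start += len(hit)
--     # Build the three outputs from the segment list.
--     result = [-1]
--     for s, p in segs:
--         a = int(s/2) - 1
--         if a not in result:
--             result.append(a)
--         result.append(int((s + len(p))/2 - 1))
--     r = set()
--     for s, p in segs:
--         for i in range(int(s/2), int((s + len(p))/2)):
--             r.add(i)
--     string_dict = {}
--     for s, p in segs:
--         string_dict[",".join([str(ii) for ii in range(int(s/2), int((s + len(p))/2))])] = p
--     return result, r, string_dict
-- ===== Notes on version B (the rewrite author's own statement) =====
-- stated objective: faster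
-- what changed: B replaces A's rescan of the entire pattern list (with a slice copy per test) at every position by a first-character bucket index consulted per position, and separates the scan (collecting matched segments) from building result/r/string_dict in three later passes.
import Mathlib
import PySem

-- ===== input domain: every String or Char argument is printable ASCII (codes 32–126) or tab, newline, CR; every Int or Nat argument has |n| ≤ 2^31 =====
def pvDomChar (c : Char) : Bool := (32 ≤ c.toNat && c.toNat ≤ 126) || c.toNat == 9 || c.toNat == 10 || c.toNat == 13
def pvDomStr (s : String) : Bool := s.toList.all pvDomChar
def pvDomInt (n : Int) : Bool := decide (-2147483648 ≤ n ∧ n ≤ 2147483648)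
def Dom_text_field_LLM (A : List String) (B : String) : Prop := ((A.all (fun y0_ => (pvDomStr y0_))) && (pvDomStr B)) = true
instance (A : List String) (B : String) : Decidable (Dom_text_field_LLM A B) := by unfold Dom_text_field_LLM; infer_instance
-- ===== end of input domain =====

-- B replaces A's rescans of the whole pattern list at every position by a first-character
-- bucket index and separates match collection from output building (objective: faster, constant-factor).

-- int(n/2) for 0 ≤ n < 2^53 (exact there: float halving of such ints is exact, truncation = floor)
def pvHalf (n : Int) : Int := PySem.Int.floordiv n 2
-- int(n/2 - 1) for 0 ≤ n < 2^53: Python truncates toward zero, so n = 1 gives int(-0.5) = 0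
def pvHalfSub1 (n : Int) : Int := if n = 1 then 0 else PySem.Int.floordiv n 2 - 1
-- range(int(s/2), int((s+L)/2)) for 0 ≤ s, 0 ≤ L
def pvIdxRange (s L : Int) : List Int := PySem.List.pyRange (pvHalf s) (pvHalf (s + L)) 1

-- ===== PORT A =====
-- the inner `for pattern in A: … break` of A
def pvFindPatA (rest : List Char) : List String → Option String
  | [] => none
  | p :: ps =>
    if p = "" then pvFindPatA rest ps
    else if PySem.Chars.startswith rest p.toList then some p else pvFindPatA rest ps

-- non-empty strings have positive length
theorem pvLen_pos {p : String} (h : p.toList ≠ []) : 1 ≤ PySem.Str.len p := by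
  have := List.length_pos_of_ne_nil h
  simp only [PySem.Str.len_eq]
  omega

-- termination helper for the while loop: a found pattern is non-empty
theorem pvFindPatA_some_len {rest : List Char} {A : List String} {p : String}
    (h : pvFindPatA rest A = some p) : 1 ≤ PySem.Str.len p := by
  induction A with
  | nil => simp [pvFindPatA] at h
  | cons q qs ih =>
    by_cases hq : q = ""
    · simp [pvFindPatA, hq] at h; exact ih h
    · by_cases hs : PySem.Chars.startswith rest q.toList = true
      · simp [pvFindPatA, hq, hs] at h
        subst h
        exact pvLen_pos (by simp [String.toList_eq_nil_iff, hq])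
      · simp [pvFindPatA, hq, hs] at h; exact ih h

-- A's while loop, carried state (start, result, r, string_dict)
def pvLoopA (A : List String) (Bc : List Char) (start : Int) (res : List Int)
    (r : PySem.Set Int) (sd : PySem.Dict String String) :
    List Int × List Int × (List (String × String)) :=
  if _h : start < (Bc.length : Int) then
    match hf : pvFindPatA (PySem.List.slice Bc (some start) none) A with
    | some p =>
        let L : Int := PySem.Str.len p
        let res1 : List Int := if (pvHalf start - 1) ∈ res then res else res ++ [pvHalf start - 1]
        let res2 : List Int := res1 ++ [pvHalfSub1 (start + L)]
        let sd1 := sd.insert (PySem.Str.join "," ((pvIdxRange start L).map PySem.Int.toStr)) p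
        let r1 := (pvIdxRange start L).foldl (fun s i => PySem.Set.add s i) r
        pvLoopA A Bc (start + L) res2 r1 sd1
    | none => pvLoopA A Bc (start + 2) res r sd
  else (res, r, sd.items)
termination_by ((Bc.length : Int) - start).toNat
decreasing_by
  · have := pvFindPatA_some_len hf; omega
  · omega

def text_field_LLM (A : List String) (B : String) : List Int × List Int × (List (String × String)) :=
  pvLoopA A B.toList 0 [-1] PySem.Set.empty PySem.Dict.empty

-- ===== PORT B =====
-- buckets[p[0]] = buckets.get(p[0], []) + [p]  (only non-empty p)
def pvBucketStep (d : PySem.Dict Char (List String)) (p : String) : PySem.Dict Char (List String) :=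
  match p.toList with
  | [] => d
  | c :: _ => d.insert c (d.getD c [] ++ [p])

def pvBuckets (A : List String) : PySem.Dict Char (List String) :=
  A.foldl pvBucketStep PySem.Dict.empty

-- first char of a pattern, as the bucket predicate
def pvHeadIs (c : Char) (p : String) : Bool :=
  match p.toList with
  | [] => false
  | c' :: _ => c' = c

theorem pvBuckets_getD (A : List String) (d : PySem.Dict Char (List String)) (c : Char) :
    (A.foldl pvBucketStep d).getD c [] = d.getD c [] ++ A.filter (pvHeadIs c) := by
  induction A generalizing d with
  | nil => simp
  | cons p ps ih =>
    simp only [List.foldl_cons, ih]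
    cases hp : p.toList with
    | nil => simp [pvBucketStep, hp, pvHeadIs]
    | cons c' cs =>
      by_cases hc : c' = c
      · subst hc
        simp [pvBucketStep, hp, pvHeadIs]
      · simp [pvBucketStep, hp, pvHeadIs, PySem.Dict.getD_insert, hc]
        exact fun h => absurd h.symm hc

-- every pattern stored in the buckets is non-empty
theorem pvBuckets_nonempty (A : List String) (c : Char) (p : String)
    (h : p ∈ (pvBuckets A).getD c []) : 1 ≤ PySem.Str.len p := by
  rw [pvBuckets, pvBuckets_getD] at h
  simp only [PySem.Dict.getD_empty, List.nil_append, List.mem_filter] at h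
  apply pvLen_pos
  intro hnil
  have := h.2
  simp [pvHeadIs, hnil] at this

-- the inner `for p in buckets.get(B[start], []): … break` of B
def pvFindPatB (Bc : List Char) (start : Int) : List String → Option String
  | [] => none
  | p :: ps =>
    if PySem.Chars.startswith (Bc.drop start.toNat) p.toList then some p
    else pvFindPatB Bc start ps

theorem pvFindPatB_some_mem {Bc : List Char} {start : Int} {l : List String} {p : String}
    (h : pvFindPatB Bc start l = some p) : p ∈ l := by
  induction l with
  | nil => simp [pvFindPatB] at h
  | cons q qs ih =>
    by_cases hs : PySem.Chars.startswith (Bc.drop start.toNat) q.toList = true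
    · simp [pvFindPatB, hs] at h; simp [h]
    · simp [pvFindPatB, hs] at h; exact List.mem_cons_of_mem _ (ih h)

-- B's while loop collecting the matched segments (start, pattern); hbk records that the
-- precomputed bucket dict holds only non-empty patterns (needed for termination)
def pvSegsLoop (bk : PySem.Dict Char (List String))
    (hbk : ∀ c p, p ∈ bk.getD c [] → 1 ≤ PySem.Str.len p) (Bc : List Char) (start : Int)
    (segs : List (Int × String)) : List (Int × String) :=
  if _h : start < (Bc.length : Int) then
    match PySem.List.pyGet? Bc start with
    | none => segs   -- unreachable for 0 ≤ start < len(B); Python would raise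
    | some c =>
      match hf : pvFindPatB Bc start (bk.getD c []) with
      | none => pvSegsLoop bk hbk Bc (start + 2) segs
      | some p => pvSegsLoop bk hbk Bc (start + PySem.Str.len p) (segs ++ [(start, p)])
  else segs
termination_by ((Bc.length : Int) - start).toNat
decreasing_by
  · omega
  · have h1 := hbk _ _ (pvFindPatB_some_mem hf); omega

-- result / r / string_dict building passes of B
def pvResStep (res : List Int) (sp : Int × String) : List Int :=
  let a := pvHalf sp.1 - 1
  (if a ∈ res then res else res ++ [a]) ++ [pvHalfSub1 (sp.1 + PySem.Str.len sp.2)]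

def pvRStep (r : PySem.Set Int) (sp : Int × String) : PySem.Set Int :=
  (pvIdxRange sp.1 (PySem.Str.len sp.2)).foldl (fun s i => PySem.Set.add s i) r

def pvSDStep (sd : PySem.Dict String String) (sp : Int × String) : PySem.Dict String String :=
  sd.insert (PySem.Str.join "," ((pvIdxRange sp.1 (PySem.Str.len sp.2)).map PySem.Int.toStr)) sp.2

def text_field_LLM_alt (A : List String) (B : String) : List Int × List Int × (List (String × String)) :=
  let segs := pvSegsLoop (pvBuckets A) (pvBuckets_nonempty A) B.toList 0 []
  (segs.foldl pvResStep [-1],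
   segs.foldl pvRStep PySem.Set.empty,
   (segs.foldl pvSDStep PySem.Dict.empty).items)

-- ===== PRECONDITION & SPEC =====
def Spec_text_field_LLM (A : List String) (B : String) (out : List Int × List Int × (List (String × String))) : Prop := out = text_field_LLM_alt A B
instance (A : List String) (B : String) (out : List Int × List Int × (List (String × String))) : Decidable (Spec_text_field_LLM A B out) := by unfold Spec_text_field_LLM; infer_instance

-- ===== CLAIM (what is proved, stated in full; the proofs are below) =====
def Claim_equal_text_field_LLM : Prop := ∀ (A : List String) (B : String), Dom_text_field_LLM A B → Spec_text_field_LLM A B (text_field_LLM A B)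

-- ===== LEMMAS AND PROOFS =====

-- the two matchers agree: scanning all of A (skipping "") = scanning the first-char bucket
theorem pvFind_eq (A : List String) (Bc : List Char) (start : Int) (c : Char)
    (h0 : 0 ≤ start) (hc : PySem.List.pyGet? Bc start = some c) :
    pvFindPatA (PySem.List.slice Bc (some start) none) A
      = pvFindPatB Bc start ((pvBuckets A).getD c []) := by
  have hslice : PySem.List.slice Bc (some start) none = Bc.drop start.toNat :=
    PySem.List.slice_from Bc h0
  rw [hslice, pvBuckets, pvBuckets_getD]
  simp only [PySem.Dict.getD_empty, List.nil_append]
  have hlt : start.toNat < Bc.length := by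
    rw [PySem.List.pyGet?_of_nonneg _ h0] at hc
    exact (List.getElem?_eq_some_iff.mp hc).1
  have hdrop : Bc.drop start.toNat = c :: Bc.drop (start.toNat + 1) := by
    rw [List.drop_eq_getElem_cons hlt]
    rw [PySem.List.pyGet?_of_nonneg _ h0, List.getElem?_eq_some_iff] at hc
    obtain ⟨_, hc⟩ := hc
    rw [hc]
  induction A with
  | nil => simp [pvFindPatA, pvFindPatB]
  | cons p ps ih =>
    cases hp : p.toList with
    | nil =>
      have hpe : p = "" := String.toList_eq_nil_iff.mp hp
      simpa [pvFindPatA, hpe, List.filter_cons, pvHeadIs, hp] using ih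
    | cons c' cs =>
      have hpe : ¬ p = "" := by
        intro h; rw [h] at hp; simp at hp
      by_cases hcc : c' = c
      · subst hcc
        simp only [List.filter_cons, pvHeadIs, hp, decide_true]
        by_cases hs : PySem.Chars.startswith (Bc.drop start.toNat) p.toList = true
        · simp [pvFindPatA, pvFindPatB, hpe, hs]
        · simpa [pvFindPatA, pvFindPatB, hpe, hs] using ih
      · have hs : PySem.Chars.startswith (Bc.drop start.toNat) p.toList = false := by
          rw [← Bool.not_eq_true, PySem.Chars.startswith_iff]
          intro hpre
          rw [hp, hdrop] at hpre
          exact hcc (List.cons_prefix_cons.mp hpre).1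
        have : pvHeadIs c p = false := by simp [pvHeadIs, hp, hcc]
        simpa [pvFindPatA, hpe, hs, List.filter_cons, this] using ih

-- pvSegsLoop's accumulator is a prefix
theorem pvSegsLoop_append (bk : PySem.Dict Char (List String))
    (hbk : ∀ c p, p ∈ bk.getD c [] → 1 ≤ PySem.Str.len p) (Bc : List Char)
    (start : Int) (segs : List (Int × String)) :
    pvSegsLoop bk hbk Bc start segs = segs ++ pvSegsLoop bk hbk Bc start [] := by
  generalize hn : ((Bc.length : Int) - start).toNat = n
  induction n using Nat.strong_induction_on generalizing start segs with
  | _ n ih =>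
  subst hn
  conv_lhs => rw [pvSegsLoop]
  conv_rhs => rw [pvSegsLoop]
  by_cases h : start < (Bc.length : Int)
  · simp only [dif_pos h]
    cases hc : PySem.List.pyGet? Bc start with
    | none => simp
    | some c =>
      simp only
      cases hf : pvFindPatB Bc start (bk.getD c []) with
      | none =>
        simp only
        exact ih ((Bc.length : Int) - (start + 2)).toNat (by omega) (start + 2) segs rfl
      | some p =>
        have h1 := hbk _ _ (pvFindPatB_some_mem hf)
        simp only
        rw [ih ((Bc.length : Int) - (start + PySem.Str.len p)).toNat (by omega)
              (start + PySem.Str.len p) (segs ++ [(start, p)]) rfl,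
            ih ((Bc.length : Int) - (start + PySem.Str.len p)).toNat (by omega)
              (start + PySem.Str.len p) ([] ++ [(start, p)]) rfl]
        simp
  · simp [h]

-- main invariant: A's interleaved loop = B's folds over the collected segments
theorem pvLoop_eq (A : List String) (Bc : List Char) (start : Int) (res : List Int)
    (r : PySem.Set Int) (sd : PySem.Dict String String) (h0 : 0 ≤ start) :
    pvLoopA A Bc start res r sd =
      ((pvSegsLoop (pvBuckets A) (pvBuckets_nonempty A) Bc start []).foldl pvResStep res,
       (pvSegsLoop (pvBuckets A) (pvBuckets_nonempty A) Bc start []).foldl pvRStep r,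
       ((pvSegsLoop (pvBuckets A) (pvBuckets_nonempty A) Bc start []).foldl pvSDStep sd).items) := by
  generalize hn : ((Bc.length : Int) - start).toNat = n
  induction n using Nat.strong_induction_on generalizing start res r sd with
  | _ n ih =>
  subst hn
  rw [pvLoopA, pvSegsLoop]
  by_cases h : start < (Bc.length : Int)
  · simp only [dif_pos h]
    have hlt : start.toNat < Bc.length := by omega
    have hc : PySem.List.pyGet? Bc start = some Bc[start.toNat] := by
      rw [PySem.List.pyGet?_of_nonneg _ h0]
      exact List.getElem?_eq_getElem hlt
    rw [pvFind_eq A Bc start Bc[start.toNat] h0 hc, hc]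
    simp only
    cases hf : pvFindPatB Bc start ((pvBuckets A).getD Bc[start.toNat] []) with
    | none =>
      simp only
      exact ih ((Bc.length : Int) - (start + 2)).toNat (by omega) (start + 2) res r sd
        (by omega) rfl
    | some p =>
      have h1 := pvBuckets_nonempty A _ _ (pvFindPatB_some_mem hf)
      simp only
      rw [pvSegsLoop_append _ _ _ _ ([] ++ [(start, p)])]
      rw [ih ((Bc.length : Int) - (start + PySem.Str.len p)).toNat (by omega)
            (start + PySem.Str.len p) _ _ _ (by omega) rfl]
      simp [pvResStep, pvRStep, pvSDStep]
  · simp [h]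

-- ===== VERDICT (by name: the statement is the Claim_ definition above) =====
theorem text_field_LLM_spec : Claim_equal_text_field_LLM := by
  intro A B _
  unfold Spec_text_field_LLM text_field_LLM text_field_LLM_alt
  exact pvLoop_eq A B.toList 0 [-1] PySem.Set.empty PySem.Dict.empty (by omega)
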